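-- pv_equiv track=rewrite | github.com/rom4ex/HashLava | services/gen_ser.py | get_password_by_index
-- ===== SOURCE A (Python) =====
-- CHARACTERS = 'abcdefghijklmnopqrstuvwxyz'
--
-- MIN_LENGTH = 1
--
-- MAX_LENGTH = 5
--
-- def get_password_by_index(index, characters, min_length, max_length):
--     password = ""
--     current_index = 0
--
--     for length in range(MIN_LENGTH, MAX_LENGTH + 1):
--         num_combinations = len(CHARACTERS) ** length
--
--         if current_index + num_combinations > index:
--             remaining_index = index - current_index
--             for _ in range(length):
--                 password += CHARACTERS[remaining_index % len(CHARACTERS)]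
--                 remaining_index //= len(CHARACTERS)
--             break
--         else:
--             current_index += num_combinations
--
--     return password[::-1]
-- ===== SOURCE B (Python) =====
-- CHARACTERS = 'abcdefghijklmnopqrstuvwxyz'
--
-- MIN_LENGTH = 1
--
-- MAX_LENGTH = 5
--
-- def get_password_by_index(index, characters, min_length, max_length):
--     # single bijective base-26 digit loop instead of scanning lengths
--     rem = index
--     out = []
--     while True:
--         out.append(CHARACTERS[rem % 26])
--         rem = rem // 26 - 1
--         if rem < 0:
--             break
--     out.reverse()
--     return "".join(out) if len(out) <= MAX_LENGTH else ""
-- ===== Notes on version B (the rewrite author's own statement) =====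
-- stated objective: alternative
-- what changed: Replaces the length-scanning enumeration (outer loop over lengths with cumulative combination counts, inner digit loop) by a single bijective base-26 digit loop (rem = rem // 26 - 1) with a final length cap.
import Mathlib
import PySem

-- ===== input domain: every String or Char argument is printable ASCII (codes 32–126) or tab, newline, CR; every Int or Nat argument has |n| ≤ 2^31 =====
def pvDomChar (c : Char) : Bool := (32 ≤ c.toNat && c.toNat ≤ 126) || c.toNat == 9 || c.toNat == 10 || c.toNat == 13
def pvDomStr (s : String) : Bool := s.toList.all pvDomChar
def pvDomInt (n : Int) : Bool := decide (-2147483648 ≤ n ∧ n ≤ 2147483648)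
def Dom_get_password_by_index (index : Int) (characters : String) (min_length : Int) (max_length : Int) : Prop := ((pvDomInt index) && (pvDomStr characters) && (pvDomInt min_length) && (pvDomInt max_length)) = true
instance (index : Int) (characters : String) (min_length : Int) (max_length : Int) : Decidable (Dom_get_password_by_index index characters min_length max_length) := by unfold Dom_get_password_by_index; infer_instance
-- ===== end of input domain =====

-- B replaces A's length-scanning enumeration by a single bijective base-26 digit loop;
-- objective: alternative decomposition (same cost).  Both ignore the parameters
-- characters/min_length/max_length, as the Python does (it reads module constants).

-- ===== PORT A =====
-- module constant CHARACTERS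
def pvCHARS : List Char := "abcdefghijklmnopqrstuvwxyz".toList

-- CHARACTERS[i]; in both programs i = rem % 26 ∈ [0, 26), so the lookup is exact
def pvCharAt (i : Int) : Char := (PySem.List.pyGet? pvCHARS i).getD ' '

-- inner loop: for _ in range(length): password += CHARACTERS[rem % 26]; rem //= 26
def pvInnerA : Nat → List Char → Int → List Char
  | 0, pw, _ => pw
  | n + 1, pw, rem =>
      pvInnerA n (pw ++ [pvCharAt (PySem.Int.mod rem 26)]) (PySem.Int.floordiv rem 26)

-- outer loop over range(MIN_LENGTH, MAX_LENGTH + 1) = [1,2,3,4,5]; break by returning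
def pvOuterA : List Nat → List Char → Int → Int → List Char
  | [], pw, _, _ => pw
  | l :: ls, pw, ci, index =>
      if ci + (26 : Int) ^ l > index then pvInnerA l pw (index - ci)
      else pvOuterA ls pw (ci + (26 : Int) ^ l) index

def get_password_by_index (index : Int) (characters : String) (min_length : Int) (max_length : Int) : String :=
  String.mk ((pvOuterA [1, 2, 3, 4, 5] [] 0 index).reverse)   -- password[::-1]

-- ===== PORT B =====
-- do-while: out.append(CHARACTERS[rem % 26]); rem = rem // 26 - 1; until rem < 0
def pvLoopB (rem : Int) (acc : List Char) : List Char :=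
  if PySem.Int.floordiv rem 26 - 1 < 0 then acc ++ [pvCharAt (PySem.Int.mod rem 26)]
  else pvLoopB (PySem.Int.floordiv rem 26 - 1) (acc ++ [pvCharAt (PySem.Int.mod rem 26)])
termination_by rem.toNat
decreasing_by
  simp only [PySem.Int.floordiv_eq_ediv_of_pos (show (0:Int) < 26 by omega)] at *
  omega

def get_password_by_index_alt (index : Int) (characters : String) (min_length : Int) (max_length : Int) : String :=
  let out := pvLoopB index []
  if out.length ≤ 5 then String.mk out.reverse else ""

-- ===== PRECONDITION & SPEC =====
def Spec_get_password_by_index (index : Int) (characters : String) (min_length : Int) (max_length : Int) (out : String) : Prop := out = get_password_by_index_alt index characters min_length max_length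
instance (index : Int) (characters : String) (min_length : Int) (max_length : Int) (out : String) : Decidable (Spec_get_password_by_index index characters min_length max_length out) := by unfold Spec_get_password_by_index; infer_instance

-- ===== CLAIM (what is proved, stated in full; the proofs are below) =====
def Claim_equal_get_password_by_index : Prop := ∀ (index : Int) (characters : String) (min_length : Int) (max_length : Int), Dom_get_password_by_index index characters min_length max_length → Spec_get_password_by_index index characters min_length max_length (get_password_by_index index characters min_length max_length)

-- ===== LEMMAS AND PROOFS =====

-- S ℓ = number of passwords of length ≤ ℓ; the recursion S (ℓ+1) = 26 * (S ℓ + 1) is the key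
def pvS : Nat → Int
  | 0 => 0
  | n + 1 => 26 * (pvS n + 1)

lemma pvS_nonneg (n : Nat) : 0 ≤ pvS n := by
  induction n with
  | zero => simp [pvS]
  | succ n ih => simp only [pvS]; omega

lemma inner_len (n : Nat) : ∀ (pw : List Char) (r : Int), (pvInnerA n pw r).length = pw.length + n := by
  induction n with
  | zero => intro pw r; simp [pvInnerA]
  | succ n ih => intro pw r; simp [pvInnerA, ih]; omega

lemma loopB_neg (r : Int) (acc : List Char) (h : r < 0) :
    pvLoopB r acc = acc ++ [pvCharAt (PySem.Int.mod r 26)] := by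
  rw [pvLoopB.eq_def]
  have hd : PySem.Int.floordiv r 26 = r / 26 :=
    PySem.Int.floordiv_eq_ediv_of_pos (show (0:Int) < 26 by norm_num)
  rw [hd, if_pos (by omega)]

lemma loopB_eq_inner : ∀ (ℓ : Nat) (r : Int) (acc : List Char),
    pvS ℓ ≤ r → r < pvS (ℓ + 1) →
    pvLoopB r acc = pvInnerA (ℓ + 1) acc (r - pvS ℓ) := by
  intro ℓ
  induction ℓ with
  | zero =>
    intro r acc h1 h2
    simp only [pvS] at h1 h2
    rw [pvLoopB.eq_def]
    have hd : PySem.Int.floordiv r 26 = r / 26 :=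
      PySem.Int.floordiv_eq_ediv_of_pos (show (0:Int) < 26 by norm_num)
    rw [hd, if_pos (by omega)]
    simp [pvInnerA, pvS]
  | succ ℓ ih =>
    intro r acc h1 h2
    have hS : pvS (ℓ + 1) = 26 * (pvS ℓ + 1) := rfl
    have hS2 : pvS (ℓ + 1 + 1) = 26 * (pvS (ℓ + 1) + 1) := rfl
    have hSn : 0 ≤ pvS ℓ := pvS_nonneg ℓ
    rw [pvLoopB.eq_def]
    have hd : PySem.Int.floordiv r 26 = r / 26 :=
      PySem.Int.floordiv_eq_ediv_of_pos (show (0:Int) < 26 by norm_num)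
    rw [hd, if_neg (by omega)]
    rw [ih (r / 26 - 1) _ (by omega) (by omega)]
    -- RHS: unfold one step of pvInnerA at length ℓ+2
    show pvInnerA (ℓ + 1) (acc ++ [pvCharAt (PySem.Int.mod r 26)]) (r / 26 - 1 - pvS ℓ) =
         pvInnerA (ℓ + 1) (acc ++ [pvCharAt (PySem.Int.mod (r - pvS (ℓ + 1)) 26)])
                  (PySem.Int.floordiv (r - pvS (ℓ + 1)) 26)
    have hm : PySem.Int.mod (r - pvS (ℓ + 1)) 26 = PySem.Int.mod r 26 := by
      rw [PySem.Int.mod_eq_emod_of_pos (show (0:Int) < 26 by norm_num), PySem.Int.mod_eq_emod_of_pos (show (0:Int) < 26 by norm_num)]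
      omega
    have hd2 : PySem.Int.floordiv (r - pvS (ℓ + 1)) 26 = r / 26 - 1 - pvS ℓ := by
      rw [PySem.Int.floordiv_eq_ediv_of_pos (show (0:Int) < 26 by norm_num)]
      omega
    rw [hm, hd2]

-- pvLoopB appends at least one character (fuel-indexed well-founded argument)
lemma loopB_len_ge_one_aux : ∀ (n : Nat) (r : Int), r.toNat ≤ n →
    ∀ acc : List Char, acc.length + 1 ≤ (pvLoopB r acc).length := by
  intro n
  induction n with
  | zero =>
    intro r hr acc
    rw [pvLoopB.eq_def]
    have hd : PySem.Int.floordiv r 26 = r / 26 :=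
      PySem.Int.floordiv_eq_ediv_of_pos (show (0:Int) < 26 by norm_num)
    rw [hd, if_pos (by omega)]
    simp
  | succ n ih =>
    intro r hr acc
    rw [pvLoopB.eq_def]
    have hd : PySem.Int.floordiv r 26 = r / 26 :=
      PySem.Int.floordiv_eq_ediv_of_pos (show (0:Int) < 26 by norm_num)
    rw [hd]
    by_cases hc : r / 26 - 1 < 0
    · rw [if_pos hc]; simp
    · rw [if_neg hc]
      have := ih (r / 26 - 1) (by omega) (acc ++ [pvCharAt (PySem.Int.mod r 26)])
      simp at this ⊢
      omega

lemma loopB_len_ge : ∀ (ℓ : Nat) (r : Int) (acc : List Char),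
    pvS ℓ ≤ r → acc.length + ℓ + 1 ≤ (pvLoopB r acc).length := by
  intro ℓ
  induction ℓ with
  | zero =>
    intro r acc _
    have := loopB_len_ge_one_aux r.toNat r le_rfl acc
    omega
  | succ ℓ ih =>
    intro r acc h
    have hS : pvS (ℓ + 1) = 26 * (pvS ℓ + 1) := rfl
    have hSn : 0 ≤ pvS ℓ := pvS_nonneg ℓ
    rw [pvLoopB.eq_def]
    have hd : PySem.Int.floordiv r 26 = r / 26 :=
      PySem.Int.floordiv_eq_ediv_of_pos (show (0:Int) < 26 by norm_num)
    rw [hd, if_neg (by omega)]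
    have := ih (r / 26 - 1) (acc ++ [pvCharAt (PySem.Int.mod r 26)]) (by omega)
    simp at this ⊢
    omega

-- evaluate one step of A's outer loop (definitional)
lemma outer_cons (l : Nat) (ls : List Nat) (pw : List Char) (ci index : Int) :
    pvOuterA (l :: ls) pw ci index =
      if ci + (26 : Int) ^ l > index then pvInnerA l pw (index - ci)
      else pvOuterA ls pw (ci + (26 : Int) ^ l) index := rfl

-- ===== VERDICT (by name: the statement is the Claim_ definition above) =====
theorem get_password_by_index_spec : Claim_equal_get_password_by_index := by
  intro index characters min_length max_length _
  unfold Spec_get_password_by_index get_password_by_index get_password_by_index_alt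
  have e1 : pvS 1 = 26 := by norm_num [pvS]
  have e2 : pvS 2 = 702 := by norm_num [pvS]
  have e3 : pvS 3 = 18278 := by norm_num [pvS]
  have e4 : pvS 4 = 475254 := by norm_num [pvS]
  have e5 : pvS 5 = 12356630 := by norm_num [pvS]
  by_cases h0 : index < 0
  · -- negative index: one char on both sides
    rw [outer_cons, if_pos (by norm_num; omega)]
    rw [loopB_neg index [] h0]
    norm_num [pvInnerA]
  · push_neg at h0
    by_cases hov : (12356630 : Int) ≤ index
    · -- overflow: A returns "", B's length cap fires
      rw [outer_cons, if_neg (by norm_num; omega)]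
      rw [outer_cons, if_neg (by norm_num; omega)]
      rw [outer_cons, if_neg (by norm_num; omega)]
      rw [outer_cons, if_neg (by norm_num; omega)]
      rw [outer_cons, if_neg (by norm_num; omega)]
      have hl := loopB_len_ge 5 index [] (by rw [e5]; omega)
      simp only [List.length_nil] at hl
      rw [if_neg (by omega)]
      rfl
    · push_neg at hov
      rcases (by omega : index < 26 ∨ 26 ≤ index ∧ index < 702 ∨
          702 ≤ index ∧ index < 18278 ∨ 18278 ≤ index ∧ index < 475254 ∨
          475254 ≤ index ∧ index < 12356630) with h | ⟨ha, hb⟩ | ⟨ha, hb⟩ | ⟨ha, hb⟩ | ⟨ha, hb⟩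
      · rw [outer_cons, if_pos (by norm_num; omega)]
        rw [loopB_eq_inner 0 index [] (by simp [pvS]; omega) (by rw [e1]; omega)]
        simp only [inner_len, List.length_nil]
        rw [if_pos (by norm_num)]
        simp [pvS]
      · rw [outer_cons, if_neg (by norm_num; omega)]
        rw [outer_cons, if_pos (by norm_num; omega)]
        rw [loopB_eq_inner 1 index [] (by rw [e1]; omega) (by rw [e2]; omega)]
        simp only [inner_len, List.length_nil]
        rw [if_pos (by norm_num)]
        rw [e1]; norm_num
      · rw [outer_cons, if_neg (by norm_num; omega)]
        rw [outer_cons, if_neg (by norm_num; omega)]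
        rw [outer_cons, if_pos (by norm_num; omega)]
        rw [loopB_eq_inner 2 index [] (by rw [e2]; omega) (by rw [e3]; omega)]
        simp only [inner_len, List.length_nil]
        rw [if_pos (by norm_num)]
        rw [e2]; norm_num
      · rw [outer_cons, if_neg (by norm_num; omega)]
        rw [outer_cons, if_neg (by norm_num; omega)]
        rw [outer_cons, if_neg (by norm_num; omega)]
        rw [outer_cons, if_pos (by norm_num; omega)]
        rw [loopB_eq_inner 3 index [] (by rw [e3]; omega) (by rw [e4]; omega)]
        simp only [inner_len, List.length_nil]
        rw [if_pos (by norm_num)]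
        rw [e3]; norm_num
      · rw [outer_cons, if_neg (by norm_num; omega)]
        rw [outer_cons, if_neg (by norm_num; omega)]
        rw [outer_cons, if_neg (by norm_num; omega)]
        rw [outer_cons, if_neg (by norm_num; omega)]
        rw [outer_cons, if_pos (by norm_num; omega)]
        rw [loopB_eq_inner 4 index [] (by rw [e4]; omega) (by rw [e5]; omega)]
        simp only [inner_len, List.length_nil]
        rw [if_pos (by norm_num)]
        rw [e4]; norm_num
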